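-- pv_equiv track=rewrite | github.com/YasiruR/didcomm-prober | scripts/tester/plotter/publish.py | findDisctnctBatches
-- ===== SOURCE A (Python) =====
-- def findDisctnctBatches(batch_sizes):
--     dist_batchs = []
--     tmp_batch = -1
--     for i in range(len(batch_sizes)):
--         if tmp_batch != batch_sizes[i]:
--             tmp_batch = batch_sizes[i]
--             exists = 0
--             for j in range(len(dist_batchs)):
--                 if dist_batchs[j] == tmp_batch:
--                     exists = 1
--                     break
--             if exists == 0:
--                 dist_batchs.append(tmp_batch)
--     return dist_batchs
-- ===== SOURCE B (Python) =====
-- def findDisctnctBatches(batch_sizes):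
--     out = []
--     rest = batch_sizes
--     while rest:
--         head = rest[0]
--         out.append(head)
--         rest = [x for x in rest if x != head]
--     return out
-- ===== Notes on version B (the rewrite author's own statement) =====
-- stated objective: alternative
-- what changed: Replaces A's single pass with a sentinel variable and an inner break-flag membership scan by repeated head-extraction: take the first remaining value, emit it, and filter all its occurrences out of the rest (no membership test or seen-set at all).
-- intended difference: On lists whose first element is -1 A's tmp_batch=-1 sentinel silently drops that leading -1 (e.g. A([-1,-1]) returns [] and A([-1,2,-1]) returns [2,-1]) while B returns the genuine first-occurrence distinct list ([-1] resp. [-1,2]), which is the intended 'distinct batch sizes' result. — e.g. on findDisctnctBatches([-1, 2, -1]): A returns [2, -1], B returns [-1, 2]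
import Mathlib
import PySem

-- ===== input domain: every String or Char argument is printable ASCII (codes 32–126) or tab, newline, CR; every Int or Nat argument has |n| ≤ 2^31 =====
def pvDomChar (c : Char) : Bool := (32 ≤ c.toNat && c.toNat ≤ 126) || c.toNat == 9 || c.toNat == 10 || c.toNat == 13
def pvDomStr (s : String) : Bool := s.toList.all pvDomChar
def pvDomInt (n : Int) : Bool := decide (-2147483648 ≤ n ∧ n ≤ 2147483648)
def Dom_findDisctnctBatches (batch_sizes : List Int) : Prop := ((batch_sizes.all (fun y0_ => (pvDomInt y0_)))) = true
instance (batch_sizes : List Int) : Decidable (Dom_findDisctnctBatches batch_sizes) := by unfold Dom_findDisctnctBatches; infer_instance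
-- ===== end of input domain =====

-- B replaces A's sentinel-variable pass with inner membership scan by repeated head-extraction
-- (emit the first remaining value, filter all its occurrences out of the rest); A wrongly drops
-- a leading -1 (see D_ below).


-- ===== PORT A =====
-- inner 'for j in range(len(dist_batchs)): if dist_batchs[j] == tmp_batch: exists = 1; break'
def pvInnerA (dist_batchs : List Int) (tmp_batch : Int) : Int :=
  match dist_batchs with
  | [] => 0
  | d :: ds => if d = tmp_batch then 1 else pvInnerA ds tmp_batch

-- outer 'for i in range(len(batch_sizes))' as structural recursion over the list,
-- carrying the loop state (dist_batchs, tmp_batch)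
def pvLoopA (dist_batchs : List Int) (tmp_batch : Int) (rest : List Int) : List Int :=
  match rest with
  | [] => dist_batchs
  | x :: r =>
    if tmp_batch ≠ x then
      if pvInnerA dist_batchs x = 0 then
        pvLoopA (dist_batchs ++ [x]) x r
      else
        pvLoopA dist_batchs x r
    else
      pvLoopA dist_batchs tmp_batch r

def findDisctnctBatches (batch_sizes : List Int) : List Int :=
  pvLoopA [] (-1) batch_sizes

-- ===== PORT B =====
-- 'while rest: head = rest[0]; out.append(head); rest = [x for x in rest if x != head]'
-- out-appending while loop as recursion producing the emitted heads in order
def pvLoopB (rest : List Int) : List Int :=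
  match rest with
  | [] => []
  | h :: t => h :: pvLoopB ((h :: t).filter (fun x => x ≠ h))
termination_by rest.length
decreasing_by
  simp only [List.filter_cons, ne_eq, decide_not, decide_eq_true_eq, not_true_eq_false,
    Bool.not_true, if_false, cond_false]
  simp only [List.length_cons, Nat.lt_succ_iff]
  exact List.length_filter_le _ _

def findDisctnctBatches_alt (batch_sizes : List Int) : List Int :=
  pvLoopB batch_sizes

-- ===== PRECONDITION & SPEC =====
-- On lists whose first element is -1, A's 'tmp_batch = -1' sentinel silently drops that
-- leading -1 (A([-1,2,-1]) = [2,-1], A([-1,-1]) = []), while B returns the genuine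
-- first-occurrence distinct list ([-1,2], [-1]), which is the intended result.
def D_findDisctnctBatches (batch_sizes : List Int) : Prop :=
  batch_sizes.head? = some (-1)
instance (batch_sizes : List Int) : Decidable (D_findDisctnctBatches batch_sizes) := by
  unfold D_findDisctnctBatches; infer_instance

def Spec_findDisctnctBatches (batch_sizes : List Int) (out : List Int) : Prop :=
  ¬ D_findDisctnctBatches batch_sizes → out = findDisctnctBatches_alt batch_sizes
instance (batch_sizes : List Int) (out : List Int) : Decidable (Spec_findDisctnctBatches batch_sizes out) := by
  unfold Spec_findDisctnctBatches; infer_instance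

def pvDiffWitness_findDisctnctBatches : List Int := [-1, 2, -1]
def pvDiffWitnessOut_findDisctnctBatches : (List Int) × (List Int) := ([2, -1], [-1, 2])

-- ===== CLAIM (what is proved, stated in full; the proofs are below) =====
def Claim_unchanged_findDisctnctBatches : Prop := ∀ (batch_sizes : List Int), Dom_findDisctnctBatches batch_sizes → Spec_findDisctnctBatches batch_sizes (findDisctnctBatches batch_sizes)
def Claim_changed_findDisctnctBatches : Prop := Dom_findDisctnctBatches (pvDiffWitness_findDisctnctBatches) ∧ D_findDisctnctBatches (pvDiffWitness_findDisctnctBatches) ∧ findDisctnctBatches (pvDiffWitness_findDisctnctBatches) = pvDiffWitnessOut_findDisctnctBatches.1 ∧ findDisctnctBatches_alt (pvDiffWitness_findDisctnctBatches) = pvDiffWitnessOut_findDisctnctBatches.2 ∧ pvDiffWitnessOut_findDisctnctBatches.1 ≠ pvDiffWitnessOut_findDisctnctBatches.2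
def Claim_exact_findDisctnctBatches : Prop := ∀ (batch_sizes : List Int), Dom_findDisctnctBatches batch_sizes → D_findDisctnctBatches batch_sizes → findDisctnctBatches batch_sizes ≠ findDisctnctBatches_alt batch_sizes

-- ===== LEMMAS AND PROOFS =====

theorem pvInnerA_eq (acc : List Int) (t : Int) :
    pvInnerA acc t = if t ∈ acc then 1 else 0 := by
  induction acc with
  | nil => simp [pvInnerA]
  | cons d ds ih =>
      simp only [pvInnerA, List.mem_cons, ih]
      by_cases h : d = t
      · simp [h]
      · simp [h, Ne.symm h]

-- A's loop, once the running sentinel is already a member of the accumulator,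
-- is exactly set-update (first-occurrence dedup continuing from acc).
theorem pvLoopA_eq_update (l : List Int) :
    ∀ (acc : List Int) (tmp : Int), tmp ∈ acc →
      pvLoopA acc tmp l = PySem.Set.update acc l := by
  induction l with
  | nil => intro acc tmp _; simp [pvLoopA, PySem.Set.update]
  | cons x r ih =>
      intro acc tmp htmp
      rw [PySem.Set.update_cons]
      by_cases hx : tmp = x
      · subst hx
        simp only [pvLoopA, ne_eq, not_true_eq_false, if_false]
        rw [PySem.Set.add_of_mem htmp]
        exact ih acc tmp htmp
      · simp only [pvLoopA, ne_eq, hx, not_false_iff, if_true, pvInnerA_eq]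
        by_cases hmem : x ∈ acc
        · rw [PySem.Set.add_of_mem hmem]
          simp only [hmem, if_true]
          norm_num
          exact ih acc x hmem
        · rw [PySem.Set.add_of_not_mem hmem]
          simp only [hmem, if_false]
          norm_num
          exact ih (acc ++ [x]) x (by simp)

-- set-update from acc is: append the first-occurrence dedup of the non-members
theorem update_eq_append_ofList_filter :
    ∀ (n : Nat) (l acc : List Int), l.length ≤ n →
      PySem.Set.update acc l = acc ++ PySem.Set.ofList (l.filter (fun x => decide (x ∉ acc))) := by
  intro n
  induction n with
  | zero =>
      intro l acc h
      have : l = [] := List.eq_nil_of_length_eq_zero (Nat.le_zero.mp h)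
      subst this
      simp [PySem.Set.update]
  | succ n ih =>
      intro l acc h
      cases l with
      | nil => simp [PySem.Set.update]
      | cons y r =>
          have hr : r.length ≤ n := Nat.lt_succ_iff.mp (by simpa using h)
          rw [PySem.Set.update_cons]
          by_cases hy : y ∈ acc
          · rw [PySem.Set.add_of_mem hy, ih r acc hr]
            simp [List.filter_cons, hy]
          · rw [PySem.Set.add_of_not_mem hy, ih r (acc ++ [y]) hr]
            simp only [List.filter_cons, hy, not_false_iff, decide_true, if_true]
            have hoy : PySem.Set.ofList (y :: r.filter (fun x => decide (x ∉ acc)))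
                = y :: PySem.Set.ofList ((r.filter (fun x => decide (x ∉ acc))).filter
                    (fun x => decide (x ∉ ([y] : List Int)))) := by
              rw [show PySem.Set.ofList (y :: r.filter (fun x => decide (x ∉ acc)))
                    = PySem.Set.update [] (y :: r.filter (fun x => decide (x ∉ acc))) from rfl,
                  PySem.Set.update_cons, PySem.Set.add_of_not_mem (List.not_mem_nil),
                  List.nil_append,
                  ih (r.filter (fun x => decide (x ∉ acc))) [y]
                    ((List.length_filter_le _ _).trans hr)]
              rfl
            rw [hoy, List.filter_filter]
            have hfe : (r.filter fun x => decide (x ∉ acc ++ [y]))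
                = (r.filter fun a => decide (a ∉ acc) && decide (a ∉ ([y] : List Int))) := by
              apply List.filter_congr
              intro a _
              simp [List.mem_append]
            rw [hfe]
            have hcomm : (r.filter fun a => decide (a ∉ acc) && decide (a ∉ ([y] : List Int)))
                = (r.filter fun a => decide (a ∉ ([y] : List Int)) && decide (a ∉ acc)) := by
              apply List.filter_congr
              intro a _
              exact Bool.and_comm _ _
            rw [hcomm]
            try simp

-- first-occurrence dedup peels the head and discards its later duplicates
theorem ofList_cons_filter (y : Int) (s : List Int) :
    PySem.Set.ofList (y :: s) = y :: PySem.Set.ofList (s.filter (fun x => x ≠ y)) := by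
  rw [show PySem.Set.ofList (y :: s) = PySem.Set.update [] (y :: s) from rfl,
      PySem.Set.update_cons, PySem.Set.add_of_not_mem (List.not_mem_nil), List.nil_append,
      update_eq_append_ofList_filter s.length s [y] le_rfl]
  have : (s.filter fun x => decide (x ∉ ([y] : List Int))) = s.filter (fun x => x ≠ y) := by
    apply List.filter_congr; intro a _; simp
  rw [this]
  rfl

-- B is first-occurrence dedup.
theorem pvLoopB_eq_ofList : ∀ (n : Nat) (l : List Int), l.length ≤ n →
    pvLoopB l = PySem.Set.ofList l := by
  intro n
  induction n with
  | zero =>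
      intro l h
      have : l = [] := List.eq_nil_of_length_eq_zero (Nat.le_zero.mp h)
      subst this; simp [pvLoopB]
  | succ n ih =>
      intro l h
      cases l with
      | nil => simp [pvLoopB]
      | cons x r =>
          have hr : r.length ≤ n := Nat.lt_succ_iff.mp (by simpa using h)
          rw [pvLoopB, ofList_cons_filter]
          have hfl : ((x :: r).filter (fun a => a ≠ x)) = r.filter (fun a => a ≠ x) := by
            simp [List.filter_cons]
          rw [hfl, ih _ ((List.length_filter_le _ _).trans hr)]

theorem alt_eq_ofList (l : List Int) :
    findDisctnctBatches_alt l = PySem.Set.ofList l :=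
  pvLoopB_eq_ofList l.length l le_rfl

-- A's loop output always extends the accumulator.
theorem pvLoopA_prefix (l : List Int) :
    ∀ (acc : List Int) (tmp : Int), ∃ s, pvLoopA acc tmp l = acc ++ s := by
  induction l with
  | nil => intro acc tmp; exact ⟨[], by simp [pvLoopA]⟩
  | cons x r ih =>
      intro acc tmp
      by_cases hx : tmp = x
      · subst hx; simpa [pvLoopA] using ih acc tmp
      · simp only [pvLoopA, ne_eq, hx, not_false_iff, if_true]
        by_cases h0 : pvInnerA acc x = 0
        · simp only [h0, if_true]
          obtain ⟨s, hs⟩ := ih (acc ++ [x]) x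
          exact ⟨x :: s, by simpa using hs⟩
        · simp only [h0, if_false]
          exact ih acc x

-- From an empty accumulator and sentinel -1, A never outputs -1 first.
theorem pvLoopA_negone (l : List Int) :
    pvLoopA [] (-1) l = [] ∨ ∃ x s, pvLoopA [] (-1) l = x :: s ∧ x ≠ -1 := by
  induction l with
  | nil => exact Or.inl rfl
  | cons x r ih =>
      by_cases hx : x = (-1 : Int)
      · subst hx; simpa [pvLoopA] using ih
      · right
        rw [show pvLoopA [] (-1) (x :: r) = pvLoopA ([] ++ [x]) x r from by
          simp [pvLoopA, Ne.symm hx, pvInnerA]]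
        obtain ⟨s, hs⟩ := pvLoopA_prefix r [x] x
        exact ⟨x, s, by simpa using hs, hx⟩

theorem a_eq_alt (l : List Int) (h : ¬ l.head? = some (-1)) :
    findDisctnctBatches l = findDisctnctBatches_alt l := by
  rw [alt_eq_ofList]
  cases l with
  | nil => rfl
  | cons x r =>
      have hx : x ≠ (-1 : Int) := by
        intro he; exact h (by simp [he])
      unfold findDisctnctBatches
      rw [show pvLoopA [] (-1) (x :: r) = pvLoopA ([] ++ [x]) x r from by
        simp [pvLoopA, Ne.symm hx, pvInnerA]]
      rw [pvLoopA_eq_update r ([] ++ [x]) x (by simp)]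
      rw [show PySem.Set.ofList (x :: r) = PySem.Set.update [] (x :: r) from rfl,
        PySem.Set.update_cons, PySem.Set.add_of_not_mem (List.not_mem_nil)]

-- ===== VERDICT (by name: the statement is the Claim_ definition above) =====
theorem findDisctnctBatches_spec : Claim_unchanged_findDisctnctBatches := by
  intro l _ hD
  exact a_eq_alt l hD

theorem findDisctnctBatches_changed : Claim_changed_findDisctnctBatches := by
  unfold Claim_changed_findDisctnctBatches
  refine ⟨by decide, by decide, by decide, ?_, by decide⟩
  rw [alt_eq_ofList]
  decide

theorem findDisctnctBatches_tight : Claim_exact_findDisctnctBatches := by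
  intro l _ hD heq
  unfold D_findDisctnctBatches at hD
  cases l with
  | nil => simp at hD
  | cons x r =>
      have hx : x = (-1 : Int) := by simpa using hD
      subst hx
      rw [alt_eq_ofList, ofList_cons_filter] at heq
      have hA : findDisctnctBatches ((-1) :: r) = pvLoopA [] (-1) r := by
        simp [findDisctnctBatches, pvLoopA]
      rw [hA] at heq
      rcases pvLoopA_negone r with h0 | ⟨y, s, hys, hy⟩
      · rw [h0] at heq; exact List.cons_ne_nil _ _ heq.symm
      · rw [hys] at heq
        exact hy (List.cons_eq_cons.mp heq).1
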